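-- pv_equiv track=rewrite | github.com/jeongseokO/LatentCOMP_cleaned | train_latentcomp_phased.py | find_last_subsequence
-- ===== SOURCE A (Python) =====
-- from typing import List, Tuple, Optional
--
-- def find_last_subsequence(hay: List[int], needle: List[int]) -> Optional[int]:
--     if not needle or not hay or len(needle) > len(hay):
--         return None
--     n = len(needle)
--     for i in range(len(hay) - n, -1, -1):
--         if hay[i:i+n] == needle:
--             return i
--     return None
-- ===== SOURCE B (Python) =====
-- from typing import List, Optional
--
-- def find_last_subsequence(hay: List[int], needle: List[int]) -> Optional[int]:
--     # Forward pass: collect all match positions, return the last one.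
--     n = len(needle)
--     if n == 0 or n > len(hay):
--         return None
--     matches = [i for i in range(len(hay) - n + 1) if hay[i:i+n] == needle]
--     return matches[-1] if matches else None
-- ===== Notes on version B (the rewrite author's own statement) =====
-- stated objective: alternative
-- what changed: A scans candidate positions backwards with an early return on the first match; B makes one forward pass collecting every match position via a comprehension and returns the last element of that list.
import Mathlib
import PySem

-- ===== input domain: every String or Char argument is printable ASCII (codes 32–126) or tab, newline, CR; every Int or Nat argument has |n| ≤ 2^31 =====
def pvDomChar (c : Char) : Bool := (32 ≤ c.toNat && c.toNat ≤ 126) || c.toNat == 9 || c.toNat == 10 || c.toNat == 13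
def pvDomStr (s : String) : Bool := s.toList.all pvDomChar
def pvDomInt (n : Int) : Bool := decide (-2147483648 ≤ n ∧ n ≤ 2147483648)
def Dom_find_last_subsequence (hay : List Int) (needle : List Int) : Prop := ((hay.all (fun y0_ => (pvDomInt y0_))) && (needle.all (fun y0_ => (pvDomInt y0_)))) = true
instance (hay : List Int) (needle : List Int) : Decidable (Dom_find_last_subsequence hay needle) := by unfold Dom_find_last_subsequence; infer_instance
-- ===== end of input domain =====

-- B replaces A's backward early-return scan by a forward comprehension of all match
-- positions followed by taking the last one (same cost, different structure).

-- ===== PORT A =====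
def pvLoopA (hay : List Int) (needle : List Int) (n : Int) : List Int → Option Int
  | [] => none
  | i :: rest => if PySem.List.slice hay (some i) (some (i + n)) = needle then some i else pvLoopA hay needle n rest

-- Port of A: backward scan over range(len(hay)-n, -1, -1), early return on first match.
def find_last_subsequence (hay : List Int) (needle : List Int) : Option Int :=
  if needle = [] ∨ hay = [] ∨ needle.length > hay.length then none
  else
    let n : Int := needle.length
    pvLoopA hay needle n (PySem.List.pyRange ((hay.length : Int) - n) (-1) (-1))

-- ===== PORT B =====
-- Port of B: forward comprehension of all match positions, then the last one.
def find_last_subsequence_alt (hay : List Int) (needle : List Int) : Option Int :=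
  let n : Int := needle.length
  if needle.length = 0 ∨ needle.length > hay.length then none
  else
    let ms := (PySem.List.pyRange 0 ((hay.length : Int) - n + 1) 1).filter
      (fun i => PySem.List.slice hay (some i) (some (i + n)) == needle)
    ms.getLast?

-- ===== PRECONDITION & SPEC =====
def Spec_find_last_subsequence (hay : List Int) (needle : List Int) (out : Option Int) : Prop := out = find_last_subsequence_alt hay needle
instance (hay : List Int) (needle : List Int) (out : Option Int) : Decidable (Spec_find_last_subsequence hay needle out) := by unfold Spec_find_last_subsequence; infer_instance

-- ===== CLAIM (what is proved, stated in full; the proofs are below) =====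
def Claim_equal_find_last_subsequence : Prop := ∀ (hay : List Int) (needle : List Int), Dom_find_last_subsequence hay needle → Spec_find_last_subsequence hay needle (find_last_subsequence hay needle)

-- ===== LEMMAS AND PROOFS =====

-- ===== VERDICT (by name: the statement is the Claim_ definition above) =====
-- A's early-return loop is List.find? with the match predicate.
theorem pvLoopA_eq_find? (hay needle : List Int) (n : Int) (l : List Int) :
    pvLoopA hay needle n l = l.find? (fun i => PySem.List.slice hay (some i) (some (i + n)) == needle) := by
  induction l with
  | nil => rfl
  | cons i rest ih =>
      simp only [pvLoopA, List.find?]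
      by_cases h : PySem.List.slice hay (some i) (some (i + n)) = needle
      · have hb : (PySem.List.slice hay (some i) (some (i + n)) == needle) = true := by
          simpa using h
        simp [hb, h]
      · have hb : (PySem.List.slice hay (some i) (some (i + n)) == needle) = false := by
          simpa using h
        simp [hb, h, ih]

theorem pv_find?_reverse {p : Int → Bool} (l : List Int) :
    l.reverse.find? p = (l.filter p).getLast? := by
  rw [List.getLast?_eq_head?_reverse, ← List.filter_reverse, ← List.head?_filter]

theorem find_last_subsequence_spec : Claim_equal_find_last_subsequence := by
  intro hay needle _
  unfold Spec_find_last_subsequence find_last_subsequence find_last_subsequence_alt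
  by_cases h0 : needle = []
  · simp [h0]
  · have hlen0 : needle.length ≠ 0 := by simpa using h0
    by_cases hgt : needle.length > hay.length
    · simp [h0, hgt, hlen0]
    · have hhay : hay ≠ [] := by
        intro he; subst he; simp at hgt; exact h0 hgt
      simp only [h0, hhay, hgt, hlen0, or_false, if_false]
      rw [pvLoopA_eq_find?]
      have hrev : PySem.List.pyRange ((hay.length : Int) - needle.length) (-1) (-1)
          = (PySem.List.pyRange 0 ((hay.length : Int) - needle.length + 1) 1).reverse := by
        rw [PySem.List.pyRange_neg_one_eq_reverse]; norm_num
      rw [hrev, pv_find?_reverse]
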